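-- pv_equiv track=rewrite | github.com/yfzzzyyls/Design_and_Verification_Projects | prepare_calibre_lvs_source.py | extract_layout_subckt_shells
-- ===== SOURCE A (Python) =====
-- from typing import Dict, List, Optional, Set, Tuple
--
-- def extract_layout_subckt_shells(text: str) -> List[Tuple[str, List[str]]]:
--     subckts: List[Tuple[str, List[str]]] = []
--     lines = text.splitlines()
--     i = 0
--     while i < len(lines):
--         line = lines[i].strip()
--         if not line.startswith(".SUBCKT "):
--             i += 1
--             continue
--         header = line
--         i += 1
--         while i < len(lines) and lines[i].lstrip().startswith("+"):
--             header += " " + lines[i].lstrip()[1:].strip()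
--             i += 1
--         tokens = header.split()
--         if len(tokens) >= 2:
--             subckts.append((tokens[1], tokens[2:]))
--     return subckts
-- ===== SOURCE B (Python) =====
-- def extract_layout_subckt_shells(text):
--     subckts = []
--
--     def flush(pending):
--         if pending is not None:
--             tokens = pending.split()
--             if len(tokens) >= 2:
--                 subckts.append((tokens[1], tokens[2:]))
--
--     pending = None
--     for raw in text.splitlines():
--         line = raw.strip()
--         if raw.lstrip().startswith("+") and pending is not None:
--             pending = pending + " " + raw.lstrip()[1:].strip()
--         elif line.startswith(".SUBCKT "):
--             flush(pending)
--             pending = line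
--         else:
--             flush(pending)
--             pending = None
--     flush(pending)
--     return subckts
-- ===== Notes on version B (the rewrite author's own statement) =====
-- stated objective: simpler
-- what changed: Replaced A's nested while loops with a manual index over the line list by a single flat for-loop state machine carrying a `pending` header buffer that is flushed on subckt start, non-continuation lines and end of input.
import Mathlib
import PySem

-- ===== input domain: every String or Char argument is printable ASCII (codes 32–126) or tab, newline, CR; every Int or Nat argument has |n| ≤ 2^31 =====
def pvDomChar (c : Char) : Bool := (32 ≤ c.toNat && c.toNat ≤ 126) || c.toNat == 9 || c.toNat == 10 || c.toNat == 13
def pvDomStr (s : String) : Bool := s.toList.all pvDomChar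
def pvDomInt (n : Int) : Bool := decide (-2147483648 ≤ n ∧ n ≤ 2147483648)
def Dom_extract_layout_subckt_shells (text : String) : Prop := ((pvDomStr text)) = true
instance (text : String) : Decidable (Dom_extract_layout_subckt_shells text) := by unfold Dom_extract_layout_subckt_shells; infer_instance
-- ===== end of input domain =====

-- B re-implements A's nested-while index scan as one flat linear pass with a `pending` header buffer (objective: simpler decomposition, same cost).

-- ===== PORT A =====
-- inner while: absorb '+'-continuation lines into the header; returns (header, remaining lines)
def pvInnerA (lines : List String) (header : String) : String × List String :=
  match lines with
  | [] => (header, [])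
  | l :: rest =>
    if PySem.Str.startswith (PySem.Str.lstrip l) "+" then
      pvInnerA rest (header ++ " " ++ PySem.Str.strip (PySem.Str.slice (PySem.Str.lstrip l) (some 1) none))
    else (header, l :: rest)

theorem pvInnerA_len (lines : List String) (header : String) :
    (pvInnerA lines header).2.length ≤ lines.length := by
  induction lines generalizing header with
  | nil => simp [pvInnerA]
  | cons l rest ih =>
    simp only [pvInnerA]
    split
    · exact le_trans (ih _) (Nat.le_succ _)
    · simp

-- outer while over the line list, accumulating the result in order
def pvLoopA (lines : List String) (acc : List (String × List String)) : List (String × List String) :=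
  match lines with
  | [] => acc
  | l :: rest =>
    let line := PySem.Str.strip l
    if PySem.Str.startswith line ".SUBCKT " = false then pvLoopA rest acc
    else
      let p := pvInnerA rest line
      match PySem.Str.split₀ p.1 with
      | _ :: t1 :: ts => pvLoopA p.2 (acc ++ [(t1, ts)])
      | _ => pvLoopA p.2 acc
  termination_by lines.length
  decreasing_by
  · simp
  · exact Nat.lt_succ_of_le (pvInnerA_len rest line)
  · exact Nat.lt_succ_of_le (pvInnerA_len rest line)

def extract_layout_subckt_shells (text : String) : List (String × List String) :=
  pvLoopA (PySem.Str.splitlines text) []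

-- ===== PORT B =====
-- flush: emit the pending header (if any) when it has at least a name token
def pvFlush (pending : Option String) (acc : List (String × List String)) : List (String × List String) :=
  match pending with
  | none => acc
  | some h =>
    match PySem.Str.split₀ h with
    | _ :: t1 :: ts => acc ++ [(t1, ts)]
    | _ => acc

-- one flat pass; `pending` is the header being assembled (none outside a .SUBCKT header)
def pvLoopB (lines : List String) (pending : Option String) (acc : List (String × List String)) : List (String × List String) :=
  match lines with
  | [] => pvFlush pending acc
  | raw :: rest =>
    let line := PySem.Str.strip raw
    if PySem.Str.startswith (PySem.Str.lstrip raw) "+" && pending.isSome then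
      pvLoopB rest (some (pending.get! ++ " " ++ PySem.Str.strip (PySem.Str.slice (PySem.Str.lstrip raw) (some 1) none))) acc
    else if PySem.Str.startswith line ".SUBCKT " then
      pvLoopB rest (some line) (pvFlush pending acc)
    else
      pvLoopB rest none (pvFlush pending acc)

def extract_layout_subckt_shells_alt (text : String) : List (String × List String) :=
  pvLoopB (PySem.Str.splitlines text) none []

-- ===== PRECONDITION & SPEC =====
def Spec_extract_layout_subckt_shells (text : String) (out : List (String × List String)) : Prop := out = extract_layout_subckt_shells_alt text
instance (text : String) (out : List (String × List String)) : Decidable (Spec_extract_layout_subckt_shells text out) := by unfold Spec_extract_layout_subckt_shells; infer_instance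

-- ===== CLAIM (what is proved, stated in full; the proofs are below) =====
def Claim_equal_extract_layout_subckt_shells : Prop := ∀ (text : String), Dom_extract_layout_subckt_shells text → Spec_extract_layout_subckt_shells text (extract_layout_subckt_shells text)

-- ===== LEMMAS AND PROOFS =====

-- while B carries a pending header, it runs exactly A's inner while, then flushes
theorem pvLoopB_some (lines : List String) (h : String) (acc : List (String × List String)) :
    pvLoopB lines (some h) acc =
      pvLoopB (pvInnerA lines h).2 none (pvFlush (some (pvInnerA lines h).1) acc) := by
  induction lines generalizing h acc with
  | nil =>
    simp [pvLoopB, pvInnerA, pvFlush]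
  | cons l rest ih =>
    simp only [pvInnerA, pvLoopB]
    by_cases hp : PySem.Chars.startswith (PySem.Chars.lstrip l.toList) ['+'] = true
    · simp [hp, ih]
    · by_cases hs : PySem.Chars.startswith (PySem.Chars.strip l.toList) ['.','S','U','B','C','K','T',' '] = true
      · simp [hp, hs, pvLoopB, pvFlush]
      · simp [hp, hs, pvLoopB, pvFlush]

-- A's loop with empty pending equals B's loop
theorem pvLoop_eq (n : Nat) (lines : List String) (acc : List (String × List String))
    (hn : lines.length ≤ n) : pvLoopA lines acc = pvLoopB lines none acc := by
  induction n generalizing lines acc with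
  | zero =>
    have : lines = [] := List.length_eq_zero_iff.mp (Nat.le_zero.mp hn)
    subst this; simp [pvLoopA, pvLoopB, pvFlush]
  | succ n ih =>
    match lines with
    | [] => simp [pvLoopA, pvLoopB, pvFlush]
    | l :: rest =>
      have hr : rest.length ≤ n := by simp at hn; omega
      by_cases hs : PySem.Chars.startswith (PySem.Chars.strip l.toList) ['.','S','U','B','C','K','T',' '] = true
      · have hlen : (pvInnerA rest (PySem.Str.strip l)).2.length ≤ n :=
          le_trans (pvInnerA_len rest _) hr
        rw [show pvLoopB (l :: rest) none acc = pvLoopB rest (some (PySem.Str.strip l)) acc by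
          simp [pvLoopB, hs, pvFlush]]
        rw [pvLoopB_some]
        simp only [pvLoopA]
        rcases hm : PySem.Str.split₀ (pvInnerA rest (PySem.Str.strip l)).1 with _ | ⟨t0, _ | ⟨t1, ts⟩⟩ <;>
          simp [hs, hm, pvFlush, ih _ _ hlen]
      · simp [pvLoopA, pvLoopB, hs, pvFlush, ih _ _ hr]

-- ===== VERDICT (by name: the statement is the Claim_ definition above) =====
theorem extract_layout_subckt_shells_spec : Claim_equal_extract_layout_subckt_shells := by
  intro text _
  unfold Spec_extract_layout_subckt_shells extract_layout_subckt_shells extract_layout_subckt_shells_alt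
  exact pvLoop_eq _ _ _ le_rfl
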